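-- pv_equiv track=rewrite | github.com/turkarshreyash/Cryptography | lab4/question3.py | index_sorter
-- ===== SOURCE A (Python) =====
-- alphabets_list = ['a','b','c','d','e','f','g','h','i','j','k','l','m','n','o','p','q','r','s','t','u','v','w','x','y','z']
--
-- def index_sorter(key_string):
--     l = []
--     key_string = key_string.lower()
--     for i in key_string:
--         l.append(alphabets_list.index(i))
--
--     #use min and list to sort the list
--
--     new_l = [0 for i in range(len(key_string))]
--
--     max =26
--
--     lk = l.copy()
--
--     count = 1
--     for i in range(len(key_string)):
--         mini = min(lk)
--         min_index = lk.index(mini)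
--         new_l[min_index] = count
--         count += 1
--         lk[min_index] = max
--
--     return new_l
-- ===== SOURCE B (Python) =====
-- alphabets_list = ['a','b','c','d','e','f','g','h','i','j','k','l','m','n','o','p','q','r','s','t','u','v','w','x','y','z']
--
-- def index_sorter(key_string):
--     vals = [alphabets_list.index(c) for c in key_string.lower()]
--     return [1 + sum(1 for j, w in enumerate(vals) if w < v or (w == v and j < i))
--             for i, v in enumerate(vals)]
-- ===== Notes on version B (the rewrite author's own statement) =====
-- stated objective: simpler
-- what changed: Replaced the destructive selection loop (repeated min-scan, first-index lookup, and 26-sentinel overwrite on a scratch list) by a direct closed-form rank: each position's value is 1 + the number of positions that compare lexicographically smaller by (letter value, position).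
import Mathlib
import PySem

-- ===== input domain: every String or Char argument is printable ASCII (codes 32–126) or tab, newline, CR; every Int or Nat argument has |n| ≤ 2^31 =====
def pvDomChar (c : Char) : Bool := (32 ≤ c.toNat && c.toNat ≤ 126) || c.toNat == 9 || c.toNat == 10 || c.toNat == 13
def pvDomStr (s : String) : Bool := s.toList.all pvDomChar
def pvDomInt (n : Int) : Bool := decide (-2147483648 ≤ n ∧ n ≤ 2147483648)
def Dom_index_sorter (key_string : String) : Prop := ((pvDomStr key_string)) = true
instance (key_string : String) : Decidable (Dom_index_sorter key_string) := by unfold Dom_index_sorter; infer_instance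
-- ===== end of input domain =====

-- B replaces A's destructive selection loop (repeated min-scan + first-index lookup + 26-sentinel
-- overwrite) by a closed-form rank: 1 + number of positions lexicographically smaller by
-- (letter value, position). Objective: simpler; equivalence proved on Pre_ (all-letter strings).

-- ===== PORT A =====
-- alphabets_list (shared by both Pythons)
def alphabetsList : List Char :=
  ['a','b','c','d','e','f','g','h','i','j','k','l','m','n','o','p','q','r','s','t','u','v','w','x','y','z']

-- alphabets_list.index(c) : Python raises ValueError when c is absent; PySem.List.index? is none
-- exactly there and Pre_ excludes those inputs, so the .getD 0 default is never reached on Pre_.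
def pvLetterVal (c : Char) : Int := ((PySem.List.index? alphabetsList c).getD 0 : Nat)

-- one iteration of A's selection loop over the state (new_l, lk, count)
def pvStepA (st : List Int × List Int × Int) : List Int × List Int × Int :=
  match PySem.List.min? st.2.1 (fun x => x) with
  | none => st
  | some mini =>
    match PySem.List.index? st.2.1 mini with
    | none => st
    | some min_index => (st.1.set min_index st.2.2, st.2.1.set min_index 26, st.2.2 + 1)

def index_sorter (key_string : String) : List Int :=
  let ks := (PySem.Str.lower key_string).toList
  let l : List Int := ks.foldl (fun acc c => acc ++ [pvLetterVal c]) []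
  let new_l : List Int := List.replicate ks.length 0
  -- max = 26 (inlined in pvStepA), lk = l.copy(), count = 1
  let res := (List.range ks.length).foldl (fun st _ => pvStepA st) (new_l, l, 1)
  res.1

-- ===== PORT B =====
def index_sorter_alt (key_string : String) : List Int :=
  let vals : List Int := ((PySem.Str.lower key_string).toList).map pvLetterVal
  (PySem.List.enumerate vals).map (fun iv =>
    1 + ((PySem.List.enumerate vals).countP
          (fun jw => jw.2 < iv.2 || (jw.2 == iv.2 && jw.1 < iv.1)) : Int))

-- ===== PRECONDITION & SPEC =====
-- Pre_ excludes exactly the strings with a character that is not a letter after lowercasing: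
-- there Python A's alphabets_list.index raises ValueError (and Python B raises it too).
def Pre_index_sorter (key_string : String) : Prop :=
  ((PySem.Str.lower key_string).toList.all (fun c => decide ('a' ≤ c) && decide (c ≤ 'z'))) = true
instance (key_string : String) : Decidable (Pre_index_sorter key_string) := by
  unfold Pre_index_sorter; infer_instance

def pvWitness_index_sorter : String := "Key"

def Spec_index_sorter (key_string : String) (out : List Int) : Prop := out = index_sorter_alt key_string
instance (key_string : String) (out : List Int) : Decidable (Spec_index_sorter key_string out) := by unfold Spec_index_sorter; infer_instance

-- ===== CLAIM (what is proved, stated in full; the proofs are below) =====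
def Claim_equal_index_sorter : Prop := ∀ (key_string : String), Dom_index_sorter key_string → Pre_index_sorter key_string → Spec_index_sorter key_string (index_sorter key_string)

-- ===== LEMMAS AND PROOFS =====

-- strict lexicographic (value, position) order on positions of v
def pvBlt (v : List Int) (j i : Nat) : Bool :=
  v.getD j 0 < v.getD i 0 || (v.getD j 0 == v.getD i 0 && decide (j < i))

-- rank index: number of positions strictly smaller than i
def pvRidx (v : List Int) (i : Nat) : Nat := (List.range v.length).countP (fun j => pvBlt v j i)

-- A's new_l after k loop iterations
def pvNewl (v : List Int) (k : Nat) : List Int :=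
  (List.range v.length).map (fun i => if pvRidx v i < k then ((pvRidx v i : Int) + 1) else 0)

-- A's lk after k loop iterations
def pvLk (v : List Int) (k : Nat) : List Int :=
  (List.range v.length).map (fun i => if pvRidx v i < k then 26 else v.getD i 0)

lemma pvBlt_irrefl (v : List Int) (i : Nat) : pvBlt v i i = false := by
  simp [pvBlt]

lemma pvBlt_total (v : List Int) {i j : Nat} (h : i ≠ j) (h2 : pvBlt v i j = false) :
    pvBlt v j i = true := by
  simp only [pvBlt, Bool.or_eq_true, Bool.and_eq_true, decide_eq_true_eq, beq_iff_eq, beq_eq_false_iff_ne,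
    Bool.or_eq_false_iff, Bool.and_eq_false_iff, decide_eq_false_iff_not] at h2 ⊢
  omega

lemma pvBlt_trans (v : List Int) {x j i : Nat} (h1 : pvBlt v x j = true) (h2 : pvBlt v j i = true) :
    pvBlt v x i = true := by
  simp only [pvBlt, Bool.or_eq_true, Bool.and_eq_true, decide_eq_true_eq, beq_iff_eq] at h1 h2 ⊢
  omega

lemma pvCountP_range_eq_card (n : Nat) (p : Nat → Bool) :
    (List.range n).countP p = ((Finset.range n).filter (fun j => p j = true)).card := by
  simp [List.countP_eq_length_filter, Finset.range, Finset.filter, Finset.card, Multiset.range]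

lemma pvRidx_lt_of_blt (v : List Int) {i j : Nat} (_hi : i < v.length) (hj : j < v.length)
    (h : pvBlt v j i = true) : pvRidx v j < pvRidx v i := by
  unfold pvRidx
  rw [pvCountP_range_eq_card, pvCountP_range_eq_card]
  apply Finset.card_lt_card
  have hsub : (Finset.range v.length).filter (fun x => pvBlt v x j = true)
      ⊆ (Finset.range v.length).filter (fun x => pvBlt v x i = true) := by
    intro x hx
    simp only [Finset.mem_filter, Finset.mem_range] at hx ⊢
    exact ⟨hx.1, pvBlt_trans v hx.2 h⟩
  rw [Finset.ssubset_iff_of_subset hsub]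
  exact ⟨j, by simp [Finset.mem_filter, Finset.mem_range, hj, h], by simp [pvBlt_irrefl]⟩

lemma pvRidx_lt (v : List Int) {i : Nat} (hi : i < v.length) : pvRidx v i < v.length := by
  unfold pvRidx
  rw [pvCountP_range_eq_card]
  have := Finset.card_range v.length
  calc ((Finset.range v.length).filter (fun j => pvBlt v j i = true)).card
      < (Finset.range v.length).card := by
        apply Finset.card_lt_card
        rw [Finset.ssubset_iff_of_subset (Finset.filter_subset _ _)]
        exact ⟨i, Finset.mem_range.mpr hi, by simp [pvBlt_irrefl]⟩
    _ = v.length := Finset.card_range _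

lemma pvRidx_inj (v : List Int) {i j : Nat} (hi : i < v.length) (hj : j < v.length)
    (h : pvRidx v i = pvRidx v j) : i = j := by
  by_contra hne
  cases hb : pvBlt v i j with
  | true => exact absurd h (Nat.ne_of_lt (pvRidx_lt_of_blt v hj hi hb))
  | false => exact absurd h.symm (Nat.ne_of_lt (pvRidx_lt_of_blt v hi hj (pvBlt_total v hne hb)))

lemma pvRidx_surj (v : List Int) {k : Nat} (hk : k < v.length) :
    ∃ i, i < v.length ∧ pvRidx v i = k := by
  have himg : (Finset.range v.length).image (pvRidx v) = Finset.range v.length := by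
    apply Finset.eq_of_subset_of_card_le
    · intro x hx
      simp only [Finset.mem_image, Finset.mem_range] at hx ⊢
      obtain ⟨i, hi, rfl⟩ := hx
      exact pvRidx_lt v hi
    · rw [Finset.card_image_of_injOn]
      intro a ha b hb hab
      exact pvRidx_inj v (Finset.mem_range.mp ha) (Finset.mem_range.mp hb) hab
  have : k ∈ (Finset.range v.length).image (pvRidx v) := by rw [himg]; exact Finset.mem_range.mpr hk
  simp only [Finset.mem_image, Finset.mem_range] at this
  obtain ⟨i, hi, hri⟩ := this
  exact ⟨i, hi, hri⟩

lemma pvStepA_state (v : List Int) (hv : ∀ x ∈ v, x < 26) (k : Nat) (hk : k < v.length) :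
    pvStepA (pvNewl v k, pvLk v k, (k : Int) + 1)
      = (pvNewl v (k+1), pvLk v (k+1), ((k+1 : Nat) : Int) + 1) := by
  obtain ⟨p, hp, hrp⟩ := pvRidx_surj v hk
  have hlen : (pvLk v k).length = v.length := by simp [pvLk]
  have hvp_lt : v.getD p 0 < 26 := by
    have hg : v.getD p 0 = v[p] := by simp [List.getD, hp]
    rw [hg]; exact hv _ (List.getElem_mem hp)
  have hp_mem : v.getD p 0 ∈ pvLk v k := by
    simp only [pvLk, List.mem_map, List.mem_range]
    exact ⟨p, hp, by rw [hrp]; simp⟩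
  cases hmin : PySem.List.min? (pvLk v k) (fun x => x) with
  | none =>
    rw [PySem.List.min?_eq_none_iff] at hmin
    rw [hmin] at hlen; simp at hlen; omega
  | some m =>
    have hm_mem := PySem.List.min?_mem hmin
    have hm_min := PySem.List.min?_isMin hmin
    have hm_eq : m = v.getD p 0 := by
      apply le_antisymm
      · exact hm_min _ hp_mem
      · simp only [pvLk, List.mem_map, List.mem_range] at hm_mem
        obtain ⟨i, hi, hmi⟩ := hm_mem
        by_cases hproc : pvRidx v i < k
        · rw [if_pos hproc] at hmi; omega
        · rw [if_neg hproc] at hmi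
          subst hmi
          by_contra hlt
          rw [not_le] at hlt
          have hblt : pvBlt v i p = true := by
            simp only [pvBlt, Bool.or_eq_true, decide_eq_true_eq]
            exact Or.inl hlt
          have := pvRidx_lt_of_blt v hp hi hblt
          omega
    subst hm_eq
    have hidx : PySem.List.index? (pvLk v k) (v.getD p 0) = some p := by
      rw [PySem.List.index?_eq_idxOf?, List.idxOf?_eq_some_iff]
      refine ⟨by rw [hlen]; exact hp, ?_, ?_⟩
      · simp [pvLk, hrp]
      · intro j hjp
        have hj : j < v.length := Nat.lt_trans hjp hp
        by_cases hproc : pvRidx v j < k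
        · simp only [pvLk, List.getElem_map, List.getElem_range, if_pos hproc]
          omega
        · simp only [pvLk, List.getElem_map, List.getElem_range, if_neg hproc]
          intro heq
          have hblt : pvBlt v j p = true := by
            simp only [pvBlt, Bool.or_eq_true, Bool.and_eq_true, decide_eq_true_eq, beq_iff_eq]
            exact Or.inr ⟨heq, hjp⟩
          have := pvRidx_lt_of_blt v hp hj hblt
          omega
    simp only [pvStepA, hmin, hidx]
    refine Prod.ext ?_ (Prod.ext ?_ ?_)
    · apply List.ext_getElem
      · simp [pvNewl]
      · intro i h1 h2
        have hi : i < v.length := by simpa [pvNewl] using h2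
        rw [List.getElem_set]
        by_cases hip : p = i
        · subst hip
          simp only [pvNewl, List.getElem_map, List.getElem_range, hrp]
          simp
        · rw [if_neg hip]
          simp only [pvNewl, List.getElem_map, List.getElem_range]
          have hne : pvRidx v i ≠ k := fun heq => hip (pvRidx_inj v hp hi (hrp.trans heq.symm))
          split_ifs <;> omega
    · apply List.ext_getElem
      · simp [pvLk]
      · intro i h1 h2
        have hi : i < v.length := by simpa [pvLk] using h2
        rw [List.getElem_set]
        by_cases hip : p = i
        · subst hip
          simp only [pvLk, List.getElem_map, List.getElem_range, hrp]
          simp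
        · rw [if_neg hip]
          simp only [pvLk, List.getElem_map, List.getElem_range]
          have hne : pvRidx v i ≠ k := fun heq => hip (pvRidx_inj v hp hi (hrp.trans heq.symm))
          split_ifs with h1' h2'
          · rfl
          · omega
          · omega
          · rfl
    · push_cast; ring


lemma pvFoldA (v : List Int) (hv : ∀ x ∈ v, x < 26) (L : List Nat) (k : Nat)
    (h : k + L.length ≤ v.length) :
    L.foldl (fun st _ => pvStepA st) (pvNewl v k, pvLk v k, (k : Int) + 1)
      = (pvNewl v (k + L.length), pvLk v (k + L.length), ((k + L.length : Nat) : Int) + 1) := by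
  induction L generalizing k with
  | nil => simp
  | cons a L ih =>
    have hk : k < v.length := by simp at h; omega
    rw [List.foldl_cons, pvStepA_state v hv k hk, ih (k + 1) (by simp at h ⊢; omega)]
    have : k + 1 + L.length = k + (L.length + 1) := by omega
    simp [this]

lemma pvNewl_zero (v : List Int) : pvNewl v 0 = List.replicate v.length 0 := by
  simp [pvNewl, List.map_const']

lemma pvLk_zero (v : List Int) : pvLk v 0 = v := by
  apply List.ext_getElem
  · simp [pvLk]
  · intro i h1 h2
    simp [pvLk, List.getD, h2]

lemma pvLetterVal_lt (c : Char) : pvLetterVal c < 26 := by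
  unfold pvLetterVal
  cases h : PySem.List.index? alphabetsList c with
  | none => simp
  | some k =>
    obtain ⟨hk, -, -⟩ := PySem.List.getElem_of_index?_eq_some h
    simp only [Option.getD_some]
    exact_mod_cast (by simpa [alphabetsList] using hk : k < 26)

lemma pvAlt_eq (key_string : String) :
    index_sorter_alt key_string
      = (List.range (((PySem.Str.lower key_string).toList.map pvLetterVal).length)).map
          (fun i => 1 + (pvRidx ((PySem.Str.lower key_string).toList.map pvLetterVal) i : Int)) := by
  have hstep : index_sorter_alt key_string
      = List.map (fun iv : Int × Int =>
          1 + (List.countP (fun jw : Int × Int => decide (jw.2 < iv.2) || (jw.2 == iv.2 && decide (jw.1 < iv.1)))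
                (PySem.List.enumerate (List.map pvLetterVal (PySem.Str.lower key_string).toList)) : Int))
          (PySem.List.enumerate (List.map pvLetterVal (PySem.Str.lower key_string).toList)) := rfl
  rw [hstep, PySem.List.enumerate_eq_map_pyRange _ 0, PySem.List.len_eq, PySem.List.pyRange_zero_natCast]
  simp only [List.map_map, List.countP_map, Function.comp_def, PySem.List.pyGetD_natCast]
  apply List.map_congr_left
  intro i hi
  have hc : (List.countP
      (fun j : Nat => decide ((((PySem.Str.lower key_string).toList.map pvLetterVal).getD j 0) < ((PySem.Str.lower key_string).toList.map pvLetterVal).getD i 0)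
        || ((((PySem.Str.lower key_string).toList.map pvLetterVal).getD j 0) == ((PySem.Str.lower key_string).toList.map pvLetterVal).getD i 0 && decide ((j : Int) < (i : Int))))
      (List.range ((PySem.Str.lower key_string).toList.map pvLetterVal).length))
      = pvRidx ((PySem.Str.lower key_string).toList.map pvLetterVal) i := by
    apply List.countP_congr
    intro j hj
    simp [pvBlt]
  rw [hc]

-- ===== VERDICT (by name: the statement is the Claim_ definition above) =====
theorem index_sorter_spec : Claim_equal_index_sorter := by
  intro key_string _hdom _hpre
  unfold Spec_index_sorter
  have hA : index_sorter key_string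
      = ((List.range ((PySem.Str.lower key_string).toList).length).foldl (fun st _ => pvStepA st)
          (List.replicate ((PySem.Str.lower key_string).toList).length 0,
           ((PySem.Str.lower key_string).toList).foldl (fun acc c => acc ++ [pvLetterVal c]) [],
           1)).1 := rfl
  set ks := (PySem.Str.lower key_string).toList with hks
  set v : List Int := ks.map pvLetterVal with hv
  have hvlen : v.length = ks.length := by simp [hv]
  have hbuild : ks.foldl (fun acc c => acc ++ [pvLetterVal c]) [] = v := by
    rw [PySem.List.foldl_append_singleton_eq_map]
    simp [hv]
  have hv26 : ∀ x ∈ v, x < 26 := by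
    intro x hx
    rw [hv] at hx
    simp only [List.mem_map] at hx
    obtain ⟨c, -, rfl⟩ := hx
    exact pvLetterVal_lt c
  have hfold := pvFoldA v hv26 (List.range ks.length) 0 (by simp [hvlen])
  rw [pvNewl_zero, pvLk_zero] at hfold
  norm_num at hfold
  rw [← hvlen] at hfold
  rw [hA, hbuild, ← hvlen, hfold]
  rw [pvAlt_eq, ← hks, ← hv]
  unfold pvNewl
  apply List.map_congr_left
  intro i hi
  rw [if_pos (pvRidx_lt v (List.mem_range.mp hi))]
  ring
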